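-- pv_equiv track=rewrite | github.com/sunnytake/CodeAndDecode | 程序员面试指南/第一章-栈和队列/用递归函数和栈逆序一个栈.py | getAndRemoveLastElement
-- ===== SOURCE A (Python) =====
-- def getAndRemoveLastElement(stack):
--     res = stack.pop()
--     if not stack:
--         return res
--     else:
--         last = getAndRemoveLastElement(stack)
--         stack.append(res)
--         return last
-- ===== SOURCE B (Python) =====
-- def getAndRemoveLastElement(stack):
--     buf = []
--     while stack:
--         buf.append(stack.pop())
--     bottom = buf.pop()
--     for x in reversed(buf):
--         stack.append(x)
--     return bottom
-- ===== Notes on version B (the rewrite author's own statement) =====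
-- stated objective: alternative
-- what changed: Replaces the O(n)-deep recursion (pop, recurse, re-append) with an iterative pop-all-into-a-buffer loop: the bottom is the last element of the buffer, the rest is re-pushed in reversed buffer order.
import Mathlib
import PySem

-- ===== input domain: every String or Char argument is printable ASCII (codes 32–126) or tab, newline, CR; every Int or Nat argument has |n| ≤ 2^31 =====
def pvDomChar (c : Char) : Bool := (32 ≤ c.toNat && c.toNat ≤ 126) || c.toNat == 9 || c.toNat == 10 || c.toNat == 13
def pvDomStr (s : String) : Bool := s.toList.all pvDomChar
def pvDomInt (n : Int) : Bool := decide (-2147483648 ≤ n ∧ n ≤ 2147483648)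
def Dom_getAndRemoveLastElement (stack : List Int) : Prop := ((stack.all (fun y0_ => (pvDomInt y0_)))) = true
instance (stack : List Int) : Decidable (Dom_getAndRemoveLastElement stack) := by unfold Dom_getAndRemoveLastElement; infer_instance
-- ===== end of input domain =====

-- B replaces A's deep recursion by an iterative pop-all-into-a-buffer pass (same return value;
-- both mutate the Python stack identically — the theorems here are about the RETURN value only).


-- ===== PORT A =====
-- res = stack.pop(); if not stack: return res; else: last = recurse(stack); stack.append(res); return last
-- (stack.pop() on [] raises IndexError → excluded by Pre_; the append only affects the mutated list, not the return)
def getAndRemoveLastElement (stack : List Int) : Int :=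
  if h : stack = [] then 0  -- unreachable under Pre_ (Python raises IndexError here)
  else
    let res := stack.getLast h          -- res = stack.pop()
    let rest := stack.dropLast
    if rest = [] then res
    else getAndRemoveLastElement rest   -- last = getAndRemoveLastElement(stack)
termination_by stack.length
decreasing_by
  simp [List.length_dropLast]
  exact List.length_pos_iff.mpr h

-- ===== PORT B =====
-- buf = []; while stack: buf.append(stack.pop())  →  buf = stack.reverse
-- bottom = buf.pop()  →  last element of buf (IndexError on [] → excluded by Pre_)
def getAndRemoveLastElement_alt (stack : List Int) : Int :=
  let buf := stack.reverse
  match buf.getLast? with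
  | some b => b
  | none => 0  -- unreachable under Pre_ (Python raises IndexError here)

-- ===== PRECONDITION & SPEC =====
-- Pre_ excludes only the empty stack, on which both A and B raise IndexError (first pop).
def Pre_getAndRemoveLastElement (stack : List Int) : Prop := stack ≠ []
instance (stack : List Int) : Decidable (Pre_getAndRemoveLastElement stack) := by unfold Pre_getAndRemoveLastElement; infer_instance
def pvWitness_getAndRemoveLastElement : List Int := [1, 2, 3]

def Spec_getAndRemoveLastElement (stack : List Int) (out : Int) : Prop := out = getAndRemoveLastElement_alt stack
instance (stack : List Int) (out : Int) : Decidable (Spec_getAndRemoveLastElement stack out) := by unfold Spec_getAndRemoveLastElement; infer_instance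

-- ===== CLAIM (what is proved, stated in full; the proofs are below) =====
def Claim_equal_getAndRemoveLastElement : Prop := ∀ (stack : List Int), Dom_getAndRemoveLastElement stack → Pre_getAndRemoveLastElement stack → Spec_getAndRemoveLastElement stack (getAndRemoveLastElement stack)

-- ===== LEMMAS AND PROOFS =====

-- A returns the head (the bottom) of any nonempty stack.
theorem portA_aux : ∀ (n : Nat) (x : Int) (xs : List Int), xs.length ≤ n → getAndRemoveLastElement (x :: xs) = x := by
  intro n
  induction n with
  | zero =>
      intro x xs hl
      have hx : xs = [] := List.eq_nil_of_length_eq_zero (Nat.le_zero.mp hl)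
      subst hx
      rw [getAndRemoveLastElement]
      simp
  | succ n ih =>
      intro x xs hl
      rcases xs with _ | ⟨y, ys⟩
      · rw [getAndRemoveLastElement]; simp
      · rw [getAndRemoveLastElement, dif_neg (by simp : ¬(x :: y :: ys = []))]
        simp only [List.dropLast_cons₂]
        rw [if_neg (by simp)]
        exact ih x ((y :: ys).dropLast) (by simp at hl ⊢; omega)

theorem portA_head (x : Int) (xs : List Int) : getAndRemoveLastElement (x :: xs) = x :=
  portA_aux xs.length x xs le_rfl

-- B returns the head too: getLast? of the reverse is head?.
theorem portB_head (x : Int) (xs : List Int) : getAndRemoveLastElement_alt (x :: xs) = x := by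
  simp [getAndRemoveLastElement_alt, List.getLast?_reverse]

-- ===== VERDICT (by name: the statement is the Claim_ definition above) =====
theorem getAndRemoveLastElement_spec : Claim_equal_getAndRemoveLastElement := by
  intro stack _ hpre
  unfold Spec_getAndRemoveLastElement
  rcases stack with _ | ⟨x, xs⟩
  · exact absurd rfl hpre
  · rw [portA_head, portB_head]
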